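-- pv_equiv track=rewrite | github.com/harrymanga/Clases_De_Programacion_Idat | Python/Tema.10/Practicas/T10.P13.py | mayorCC
-- ===== SOURCE A (Python) =====
-- def vocales(n):
--
--     v = ["a", "e", "i", "o", "u", "á", "é", "í", "ó", "ú", "ü"]
--     contV = 0
--
--     lista = n
--
--     list(lista)
--
--     for i in v:
--
--         a = lista.count(i)
--
--         contV += a
--
--     return contV
--
-- def consonantes(n):
--
--     return len(n) - vocales(n)
--
-- def mayorCC(x):
--
--     lista = []
--
--     listaMCC = []
--
--     for valor in x:
--
--         cV = consonantes(valor)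
--
--         lista.append(cV)
--
--     for i in range(len(lista)):
--
--         if lista[i] == max(lista):
--
--             listaMCC.append(x[i])
--
--     return listaMCC
-- ===== SOURCE B (Python) =====
-- def vocales(n):
--
--     v = ["a", "e", "i", "o", "u", "á", "é", "í", "ó", "ú", "ü"]
--     contV = 0
--
--     lista = n
--
--     list(lista)
--
--     for i in v:
--
--         a = lista.count(i)
--
--         contV += a
--
--     return contV
--
-- def consonantes(n):
--
--     return len(n) - vocales(n)
--
-- def mayorCC(x):
--     groups = {}
--     for valor in x:
--         groups.setdefault(consonantes(valor), []).append(valor)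
--     if not groups:
--         return []
--     return groups[max(groups)]
-- ===== Notes on version B (the rewrite author's own statement) =====
-- stated objective: faster
-- what changed: B groups words into a dict keyed by consonant count in one pass and returns the bucket of the maximum key, instead of building a parallel counts list and re-scanning it with max(lista) recomputed inside the loop.
import Mathlib
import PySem

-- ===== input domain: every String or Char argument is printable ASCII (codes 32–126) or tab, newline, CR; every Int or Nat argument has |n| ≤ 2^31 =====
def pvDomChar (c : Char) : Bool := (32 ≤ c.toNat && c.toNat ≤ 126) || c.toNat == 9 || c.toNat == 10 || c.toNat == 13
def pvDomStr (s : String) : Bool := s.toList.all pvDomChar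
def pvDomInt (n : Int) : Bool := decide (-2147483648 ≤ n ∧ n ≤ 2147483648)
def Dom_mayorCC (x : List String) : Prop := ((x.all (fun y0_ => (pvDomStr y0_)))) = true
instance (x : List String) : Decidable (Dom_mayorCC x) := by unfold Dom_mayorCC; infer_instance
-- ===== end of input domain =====

-- B replaces A's parallel counts list + re-scan against max(lista) with a one-pass dict keyed by
-- consonant count and a single max-key lookup (faster: max is no longer recomputed per word).

-- ===== PORT A =====
-- helper vocales: counts occurrences of each vowel string in n (each is 1 char, so substring count = char count)
def vocales (n : String) : Int :=
  (["a", "e", "i", "o", "u", "á", "é", "í", "ó", "ú", "ü"]).foldl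
    (fun contV i => contV + (PySem.Str.count n i : Int)) 0

def consonantes (n : String) : Int := PySem.Str.len n - vocales n

def mayorCC (x : List String) : List String :=
  let lista : List Int := x.foldl (fun acc valor => acc ++ [consonantes valor]) []
  -- for i in range(len(lista)): if lista[i] == max(lista): listaMCC.append(x[i])
  -- max(lista) is only evaluated inside the loop, where lista is nonempty, so .getD 0 is never the default
  (PySem.List.pyRange 0 (lista.length : Int) 1).foldl
    (fun listaMCC i =>
      if PySem.List.pyGetD lista i 0 = (PySem.List.max? lista (fun y => y)).getD 0
      then listaMCC ++ [PySem.List.pyGetD x i ""] else listaMCC) []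

-- ===== PORT B =====
def mayorCC_alt (x : List String) : List String :=
  -- groups.setdefault(consonantes(valor), []).append(valor)  — in-place append = Dict.modify
  let groups := x.foldl (fun d valor => d.modify (consonantes valor) [] (· ++ [valor])) PySem.Dict.empty
  -- 'if not groups: return []; return groups[max(groups)]' — max over the keys; key always present
  match PySem.List.max? groups.keys (fun k => k) with
  | none => []
  | some m => groups.getD m []

-- ===== PRECONDITION & SPEC =====
def Spec_mayorCC (x : List String) (out : List String) : Prop := out = mayorCC_alt x
instance (x : List String) (out : List String) : Decidable (Spec_mayorCC x out) := by unfold Spec_mayorCC; infer_instance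

-- ===== CLAIM (what is proved, stated in full; the proofs are below) =====
def Claim_equal_mayorCC : Prop := ∀ (x : List String), Dom_mayorCC x → Spec_mayorCC x (mayorCC x)

-- ===== LEMMAS AND PROOFS =====

-- A's result is the filter of x by 'consonant count = M' for M = max of the counts
theorem pyGetD_counts (x : List String) (i : Int) :
    PySem.List.pyGetD (x.map consonantes) i 0 = consonantes (PySem.List.pyGetD x i "") := by
  have h := PySem.List.pyGetD_map consonantes x i ""
  have h0 : consonantes "" = 0 := by decide
  rw [h0] at h
  exact h

theorem mayorCC_eq_filter (x : List String) (M : Int)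
    (hM : PySem.List.max? (x.map consonantes) (fun y => y) = some M) :
    mayorCC x = x.filter (fun v => decide (consonantes v = M)) := by
  unfold mayorCC
  rw [PySem.List.foldl_append_singleton_eq_map]
  simp only [List.nil_append, List.length_map, hM, Option.getD_some, pyGetD_counts]
  rw [PySem.List.foldl_pyRange_zero_pyGetD' x ""
      (fun acc v => if consonantes v = M then acc ++ [v] else acc) []]
  rw [PySem.List.foldl_append_ite_eq_filter]
  simp

-- B's bucket at key M is the same filter
theorem groups_getD (x : List String) (M : Int) :
    (x.foldl (fun d valor => d.modify (consonantes valor) [] (· ++ [valor]))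
        PySem.Dict.empty).getD M []
      = x.filter (fun v => decide (consonantes v = M)) := by
  rw [show (fun (d : PySem.Dict Int (List String)) valor =>
        d.modify (consonantes valor) [] (· ++ [valor]))
      = fun d valor => (fun d (p : Int × String) => PySem.Dict.modify d p.1 [] (· ++ [p.2])) d
          ((fun v => (consonantes v, v)) valor) from rfl,
     ← List.foldl_map (f := fun v => (consonantes v, v))
        (g := fun (d : PySem.Dict Int (List String)) (p : Int × String) => d.modify p.1 [] (· ++ [p.2]))]
  rw [PySem.Dict.getD_foldl_modify_append]
  simp only [PySem.Dict.getD_empty, List.nil_append, List.filter_map, List.map_map,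
    Function.comp_def, List.map_id']
  have hpred : (fun v => consonantes v == M) = (fun v => decide (consonantes v = M)) := by
    funext v; rfl
  rw [hpred]

-- B's key list is the dedup of the counts
theorem groups_keys (x : List String) :
    (x.foldl (fun d valor => d.modify (consonantes valor) [] (· ++ [valor]))
        PySem.Dict.empty).keys = PySem.List.dedup (x.map consonantes) := by
  rw [PySem.Dict.keys_foldl_modify_key]
  simp [PySem.Dict.keys_empty, PySem.Set.update_nil_left]

-- ===== VERDICT (by name: the statement is the Claim_ definition above) =====
theorem mayorCC_spec : Claim_equal_mayorCC := by
  intro x _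
  unfold Spec_mayorCC
  unfold mayorCC_alt
  simp only []
  rw [groups_keys]
  cases hk : PySem.List.max? (PySem.List.dedup (x.map consonantes)) (fun k => k) with
  | none =>
    rw [PySem.List.max?_eq_none_iff] at hk
    have hx : x = [] := by
      cases x with
      | nil => rfl
      | cons a t =>
        exfalso
        have : consonantes a ∈ PySem.List.dedup ((a :: t).map consonantes) := by
          rw [PySem.List.mem_dedup]; simp
        rw [hk] at this; simp at this
    subst hx; rfl

  | some m =>
    cases hc : PySem.List.max? (x.map consonantes) (fun y => y) with
    | none =>
      rw [PySem.List.max?_eq_none_iff] at hc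
      exfalso
      have := PySem.List.max?_mem hk
      rw [PySem.List.mem_dedup, hc] at this; simp at this
    | some M =>
      have hmM : m = M := by
        have h1 := PySem.List.max?_mem hk
        rw [PySem.List.mem_dedup] at h1
        have h2 := PySem.List.max?_mem hc
        have h3 := PySem.List.max?_isMax hc _ h1
        have h4 := PySem.List.max?_isMax hk M (by rw [PySem.List.mem_dedup]; exact h2)
        simp only [] at h3 h4
        omega
      rw [mayorCC_eq_filter x M hc, hmM]
      show x.filter (fun v => decide (consonantes v = M))
        = (x.foldl (fun d valor => d.modify (consonantes valor) [] (· ++ [valor]))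
            PySem.Dict.empty).getD M []
      exact (groups_getD x M).symm
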